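-- pv_equiv track=rewrite | github.com/zdragonite21/USACO | Bronze 2022 Feb Solutions/1/1.py | exe
-- ===== SOURCE A (Python) =====
-- def factors(x):
--     # generates factors not including 1 or x
--     ls = []
--     i = 2
--     while i * i <= x:
--         if x % i == 0:
--             ls.append(i)
--             if x // i != i:
--                 ls.append(x // i)
--         i += 1
--     return sorted(ls)
--
-- def exe(log):
--     # first, checks if all the values are the same
--     # next, check each factor, stepping left to right and check whether or not it work
--     # if none of the above works, calcuate the score based on the log summed up
--     if all(log[0] == log[x] for x in range(len(log))):
--         return 0
--
--     max_val = max(log)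
--     sum_log = sum(log)
--
--     fact = factors(sum_log)
--
--     # this filters all factors greater than or equal to the max value in the log
--     # we do this because we can only add values, hence the final answer can never be less than the maximum in the log
--     fact = list(filter(lambda x: x >= max_val, fact))
--
--     for factor in fact:
--         sum_ = 0
--         for i in range(len(log)):
--             sum_ += log[i]
--             if sum_ == factor:
--                 sum_ = 0
--                 if i == (len(log) - 1):
--                     return (len(log)) - (sum_log // factor)
--             elif sum_ > factor:
--                 break
--
--     # if no factors work, we must return the [sort of] worst case senario which is all the logs combined into one number
--     return len(log) - 1
-- ===== SOURCE B (Python) =====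
-- def factors(x):
--     # generates factors not including 1 or x
--     ls = []
--     i = 2
--     while i * i <= x:
--         if x % i == 0:
--             ls.append(i)
--             if x // i != i:
--                 ls.append(x // i)
--         i += 1
--     return sorted(ls)
--
-- def exe(log):
--     # One pass over the log: every candidate block-sum is tracked simultaneously
--     # (target, alive, done) instead of rescanning the log once per candidate.
--     if all(v == log[0] for v in log):
--         return 0
--
--     n = len(log)
--     max_val = max(log)
--     sum_log = sum(log)
--     cands = [f for f in factors(sum_log) if f >= max_val]
--
--     # per-candidate state: [next target, still alive, matched exactly at the last index]
--     states = [[f, True, False] for f in cands]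
--     prefix = 0
--     for i, v in enumerate(log):
--         prefix += v
--         for k, f in enumerate(cands):
--             st = states[k]
--             if not st[1]:
--                 continue
--             if prefix == st[0]:
--                 st[0] += f
--                 if i == n - 1:
--                     st[2] = True
--             elif prefix > st[0]:
--                 st[1] = False
--
--     for k, f in enumerate(cands):
--         if states[k][2]:
--             return n - sum_log // f
--     return n - 1
-- ===== Notes on version B (the rewrite author's own statement) =====
-- stated objective: alternative
-- what changed: A rescans the whole log once per candidate block-sum with a running-sum/reset/break loop; B makes a single pass over the log, advancing a (target, alive, matched-at-end) state for every candidate simultaneously, and selects the smallest finished candidate afterwards.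
import Mathlib
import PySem

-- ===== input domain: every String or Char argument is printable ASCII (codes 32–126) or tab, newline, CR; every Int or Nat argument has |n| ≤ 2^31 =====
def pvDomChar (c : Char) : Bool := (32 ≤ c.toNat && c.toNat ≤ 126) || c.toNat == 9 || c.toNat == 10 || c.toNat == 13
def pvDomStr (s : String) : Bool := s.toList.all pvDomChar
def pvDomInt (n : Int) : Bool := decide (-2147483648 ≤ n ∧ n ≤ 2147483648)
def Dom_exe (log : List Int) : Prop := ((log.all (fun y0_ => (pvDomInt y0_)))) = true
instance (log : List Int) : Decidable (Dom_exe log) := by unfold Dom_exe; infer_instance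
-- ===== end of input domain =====

-- B replaces A's per-factor rescans of the log by ONE pass over the log that advances
-- the (target, alive, matched-at-end) state of every candidate block-sum simultaneously;
-- objective: alternative (same cost, different traversal).

-- ===== PORT A =====
-- while i * i <= x: collect i (and x // i when distinct); shared verbatim by both Pythons
def factorsAux (x : Int) (i : Int) (ls : List Int) : List Int :=
  if h : i * i ≤ x then
    factorsAux x (i + 1)
      (if PySem.Int.mod x i = 0 then
         ls ++ (i :: (if PySem.Int.floordiv x i ≠ i then [PySem.Int.floordiv x i] else []))
       else ls)
  else ls
termination_by (x + 2 - i).toNat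
decreasing_by
  have : i < x + 2 := by nlinarith [sq_nonneg i, h]
  omega

def factors (x : Int) : List Int :=
  PySem.List.sorted (factorsAux x 2 []) (fun v => v) false

-- A's inner loop: running sum with reset on match, break on overshoot;
-- 'i == len(log) - 1' becomes 'rest = []' (the indices are consumed in order)
def innerA : List Int → Int → Int → Bool
  | [], _, _ => false
  | v :: rest, s, f =>
    let s' := s + v
    if s' = f then (if rest = [] then true else innerA rest 0 f)
    else if s' > f then false
    else innerA rest s' f

-- A's outer loop over the candidate factors, first success returns
def loopA (log : List Int) (sum_log : Int) : List Int → Int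
  | [] => (log.length : Int) - 1
  | f :: rest =>
    if innerA log 0 f then (log.length : Int) - PySem.Int.floordiv sum_log f
    else loopA log sum_log rest

def exe (log : List Int) : Int :=
  if (PySem.List.pyRange 0 (log.length : Int) 1).all
       (fun x => PySem.List.pyGet? log 0 == PySem.List.pyGet? log x) then 0
  else
    let max_val := (PySem.List.max? log (fun v => v)).getD 0  -- list is nonempty here
    let sum_log := log.sum
    let fact := (factors sum_log).filter (fun x => decide (x ≥ max_val))
    loopA log sum_log fact

-- ===== PORT B =====
-- per-candidate state (f, target, alive, done); one update per log element
def stepOne (n p i : Int) (s : Int × Int × Bool × Bool) : Int × Int × Bool × Bool :=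
  match s with
  | (f, t, alive, done) =>
    if !alive then (f, t, alive, done)
    else if p = t then (f, t + f, alive, if i = n - 1 then true else done)
    else if p > t then (f, t, false, done)
    else (f, t, alive, done)

def firstDone (n sum_log : Int) : List (Int × Int × Bool × Bool) → Int
  | [] => n - 1
  | (f, _, _, done) :: rest =>
    if done then n - PySem.Int.floordiv sum_log f else firstDone n sum_log rest

def exe_alt (log : List Int) : Int :=
  if log.all (fun v => some v == PySem.List.pyGet? log 0) then 0
  else
    let n : Int := log.length
    let max_val := (PySem.List.max? log (fun v => v)).getD 0  -- list is nonempty here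
    let sum_log := log.sum
    let cands := (factors sum_log).filter (fun x => decide (x ≥ max_val))
    let init := cands.map (fun f => (f, f, true, false))
    let final := (PySem.List.enumerate log 0).foldl
      (fun (ps : Int × List (Int × Int × Bool × Bool)) iv =>
        let p := ps.1 + iv.2
        (p, ps.2.map (fun s => stepOne n p iv.1 s)))
      (0, init)
    firstDone n sum_log final.2

-- ===== PRECONDITION & SPEC =====
def Spec_exe (log : List Int) (out : Int) : Prop := out = exe_alt log
instance (log : List Int) (out : Int) : Decidable (Spec_exe log out) := by unfold Spec_exe; infer_instance

-- ===== CLAIM (what is proved, stated in full; the proofs are below) =====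
def Claim_equal_exe : Prop := ∀ (log : List Int), Dom_exe log → Spec_exe log (exe log)

-- ===== LEMMAS AND PROOFS =====

-- the two all-equal checks agree
theorem allEq_agree (log : List Int) :
    ((PySem.List.pyRange 0 (log.length : Int) 1).all
       (fun x => PySem.List.pyGet? log 0 == PySem.List.pyGet? log x))
    = (log.all (fun v => some v == PySem.List.pyGet? log 0)) := by
  rw [Bool.eq_iff_iff]
  simp only [List.all_eq_true, PySem.List.mem_pyRange_one, beq_iff_eq]
  constructor
  · intro hA v hv
    obtain ⟨k, hk, rfl⟩ := List.mem_iff_getElem.mp hv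
    have := hA (k : Int) ⟨by omega, by exact_mod_cast hk⟩
    rw [PySem.List.pyGet?_natCast, List.getElem?_eq_getElem hk] at this
    exact this.symm
  · intro hB x hx
    obtain ⟨hx0, hxn⟩ := hx
    have hlt : x.toNat < log.length := by omega
    rw [PySem.List.pyGet?_of_nonneg log hx0, List.getElem?_eq_getElem hlt]
    exact (hB _ (List.getElem_mem hlt)).symm

-- B's single-element step of one factor, with the running prefix
def stepG (n : Int) (b : Int × (Int × Int × Bool × Bool)) (iv : Int × Int) :
    Int × (Int × Int × Bool × Bool) :=
  (b.1 + iv.2, stepOne n (b.1 + iv.2) iv.1 b.2)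

-- pointwise commutation: the one-pass fold over the state LIST is the list of per-factor folds
theorem fold_map_commute (n : Int) :
    ∀ (xs : List (Int × Int)) (p0 : Int) (sts : List (Int × Int × Bool × Bool)),
    ((xs.foldl
      (fun (ps : Int × List (Int × Int × Bool × Bool)) iv =>
        let p := ps.1 + iv.2
        (p, ps.2.map (fun s => stepOne n p iv.1 s)))
      (p0, sts)).2)
    = sts.map (fun s => (xs.foldl (stepG n) (p0, s)).2) := by
  intro xs
  induction xs with
  | nil => intro p0 sts; simp
  | cons iv xs ih =>
    intro p0 sts
    simp only [List.foldl_cons]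
    rw [ih]
    simp [List.map_map, stepG]

-- a dead state never changes again
theorem fold_dead (n : Int) :
    ∀ (xs : List (Int × Int)) (p0 f t : Int) (d : Bool),
    ((xs.foldl (stepG n) (p0, (f, t, false, d))).2) = (f, t, false, d) := by
  intro xs
  induction xs with
  | nil => intro p0 f t d; rfl
  | cons iv xs ih =>
    intro p0 f t d
    simp only [List.foldl_cons, stepG, stepOne]
    exact ih _ _ _ _

-- the first component of the state is preserved
theorem fold_fst (n : Int) :
    ∀ (xs : List (Int × Int)) (p0 : Int) (s : Int × Int × Bool × Bool),
    ((xs.foldl (stepG n) (p0, s)).2).1 = s.1 := by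
  intro xs
  induction xs with
  | nil => intro p0 s; rfl
  | cons iv xs ih =>
    intro p0 s
    simp only [List.foldl_cons]
    rw [ih]
    obtain ⟨f, t, a, d⟩ := s
    simp only [stepG, stepOne]
    split_ifs <;> rfl

-- per-factor equivalence of B's scan with A's inner loop
theorem perFactor (n f : Int) :
    ∀ (rest : List Int) (j p s t : Int),
    t - f = p - s → j + (rest.length : Int) = n →
    (((PySem.List.enumerate rest j).foldl (stepG n) (p, (f, t, true, false))).2).2.2.2
      = innerA rest s f := by
  intro rest
  induction rest with
  | nil => intro j p s t _ _; rfl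
  | cons v rest ih =>
    intro j p s t hinv hlen
    rw [PySem.List.enumerate_cons, List.foldl_cons]
    have hstep : stepG n (p, (f, t, true, false)) (j, v)
        = (p + v, stepOne n (p + v) j (f, t, true, false)) := rfl
    rw [hstep]
    show _ = innerA (v :: rest) s f
    unfold innerA
    simp only [stepOne, Bool.not_true]
    by_cases h1 : p + v = t
    · have h1' : s + v = f := by omega
      simp only [h1, if_true, h1', Bool.false_eq_true, if_false]
      cases rest with
      | nil =>
        have hj : j = n - 1 := by simp at hlen; omega
        simp [PySem.List.enumerate_nil, hj]
      | cons w rest' =>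
        have hj : ¬ (j = n - 1) := by
          simp [List.length_cons] at hlen; omega
        simp only [hj, if_false]
        have : (w :: rest') ≠ [] := by simp
        rw [if_neg this]
        exact ih (j + 1) t 0 (t + f) (by omega)
          (by simp [List.length_cons] at hlen ⊢; omega)
    · have h1' : ¬ (s + v = f) := by omega
      by_cases h2 : p + v > t
      · have h2' : s + v > f := by omega
        simp only [h1, if_false, Bool.false_eq_true, h2, if_true, h1', h2']
        rw [fold_dead]
      · have h2' : ¬ (s + v > f) := by omega
        simp only [h1, if_false, Bool.false_eq_true, h2, h1', h2']
        exact ih (j + 1) (p + v) (s + v) t (by omega)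
          (by simp [List.length_cons] at hlen ⊢; omega)

theorem firstDone_cons (n s : Int) (st : Int × Int × Bool × Bool)
    (l : List (Int × Int × Bool × Bool)) :
    firstDone n s (st :: l)
      = if st.2.2.2 then n - PySem.Int.floordiv s st.1 else firstDone n s l := by
  obtain ⟨a, b, c, d⟩ := st
  rfl

-- selection: first done state vs A's first successful factor
theorem select (log : List Int) (sum_log : Int) :
    ∀ fs : List Int,
    firstDone (log.length : Int) sum_log
      (fs.map (fun f =>
        ((PySem.List.enumerate log 0).foldl (stepG (log.length : Int))
          (0, (f, f, true, false))).2))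
    = loopA log sum_log fs := by
  intro fs
  induction fs with
  | nil => rfl
  | cons f fs ih =>
    simp only [List.map_cons]
    rw [firstDone_cons]
    rw [fold_fst (log.length : Int) (PySem.List.enumerate log 0) 0 (f, f, true, false)]
    rw [perFactor (log.length : Int) f log 0 0 0 f (by ring) (by simp)]
    rw [ih]
    rfl

-- ===== VERDICT (by name: the statement is the Claim_ definition above) =====
theorem exe_spec : Claim_equal_exe := by
  intro log _
  unfold Spec_exe exe exe_alt
  rw [allEq_agree]
  cases hc : (log.all (fun v => some v == PySem.List.pyGet? log 0)) with
  | true => simp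
  | false =>
    simp only [Bool.false_eq_true, if_false]
    rw [fold_map_commute, List.map_map]
    exact (select log log.sum _).symm
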